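-- pv_equiv track=rewrite | github.com/rikicamme01/DialogiTECH | src/datasets/ie_hyperion_dataset.py | find_segmentation
-- ===== SOURCE A (Python) =====
-- import string
--
-- def find_segmentation(bounds, text):
--     text_list = text.translate(str.maketrans('', '', string.punctuation)).split()
--     segmentation = ['0' for i in range(len(text_list))]
--     segmentation[-1] = '1'
--
--     ends = []
--     end = 0
--     for span in text_list:
--         word_list = span.translate(str.maketrans('', '', string.punctuation)).split()
--         try:
--             end = text_list.index(word_list[-1], end)
--         except:
--                 end = end + len(word_list) -1
--         if end < len(text_list):
--             ends.append(end)
--     for i in ends: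
--         segmentation[i] = '1'
--
--     return ''.join(segmentation)
-- ===== SOURCE B (Python) =====
-- import string
--
-- def find_segmentation(bounds, text):
--     words = text.translate(str.maketrans('', '', string.punctuation)).split()
--     bits = ['1' if i == 0 or w != words[i - 1] else '0'
--             for i, w in enumerate(words)]
--     bits[-1] = '1'
--     return ''.join(bits)
-- ===== Notes on version B (the rewrite author's own statement) =====
-- stated objective: simpler
-- what changed: A re-runs maketrans/translate/split on every word and searches with list.index from a moving start to collect segment-end indices into a list, then writes them into a preallocated bit list; B marks '1' directly at the first word of each run of equal consecutive words (i == 0 or w != words[i-1]) plus the last word, in one comprehension with no searching; Pre_ excludes texts with no words left after punctuation removal, where both raise IndexError on [-1].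
import Mathlib
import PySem

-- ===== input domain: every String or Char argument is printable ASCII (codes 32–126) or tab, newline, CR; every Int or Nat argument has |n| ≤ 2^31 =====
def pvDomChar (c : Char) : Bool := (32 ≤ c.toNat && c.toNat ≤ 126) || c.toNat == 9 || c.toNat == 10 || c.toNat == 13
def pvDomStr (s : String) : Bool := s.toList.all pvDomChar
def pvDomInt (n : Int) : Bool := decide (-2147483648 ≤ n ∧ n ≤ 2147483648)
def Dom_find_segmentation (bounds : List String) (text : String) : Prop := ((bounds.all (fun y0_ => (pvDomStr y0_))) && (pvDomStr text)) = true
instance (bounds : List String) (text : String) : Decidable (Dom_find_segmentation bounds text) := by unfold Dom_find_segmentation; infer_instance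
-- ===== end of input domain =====

-- B replaces A's per-word retranslate/resplit and list.index scans by one comprehension that
-- marks the first word of each run of equal consecutive words (and the last word); simpler.

-- ===== PORT A =====

-- membership in string.punctuation: exactly the 32 ASCII chars 33-47, 58-64, 91-96, 123-126
def pyIsPunct (c : Char) : Bool :=
  (33 ≤ c.toNat && c.toNat ≤ 47) || (58 ≤ c.toNat && c.toNat ≤ 64) ||
  (91 ≤ c.toNat && c.toNat ≤ 96) || (123 ≤ c.toNat && c.toNat ≤ 126)

-- exact port of s.translate(str.maketrans('', '', string.punctuation)): delete those chars
def pyRemovePunct (s : String) : String :=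
  String.ofList (s.toList.filter (fun c => !pyIsPunct c))

-- exact port of list.index(v, start): Python clamps a negative start to max(start+len, 0) and
-- returns the first position >= start holding v; none = ValueError
def pyIndexFrom (xs : List String) (v : String) (start : Int) : Option Nat :=
  let s : Nat := (if start < 0 then start + xs.length else start).toNat
  (PySem.List.index? (xs.drop s) v).map (· + s)

-- A's try/except block: the new value of end (bare except catches the IndexError of
-- word_list[-1] as well as the ValueError of list.index)
def stepAEnd (text_list : List String) (st2 : Int) (word_list : List String) : Int :=
  match PySem.List.pyGet? word_list (-1) with
  | some w =>
    (match pyIndexFrom text_list w st2 with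
     | some k => (k : Int)
     | none => st2 + (word_list.length : Int) - 1)
  | none => st2 + (word_list.length : Int) - 1

def stepA (text_list : List String) (st : List Int × Int) (span : String) : List Int × Int :=
  let word_list := PySem.Str.split₀ (pyRemovePunct span)
  let e : Int := stepAEnd text_list st.2 word_list
  if e < (text_list.length : Int) then (st.1 ++ [e], e) else (st.1, e)

def find_segmentation (bounds : List String) (text : String) : String :=
  let text_list := PySem.Str.split₀ (pyRemovePunct text)
  let n := text_list.length
  if n = 0 then "" else
  let seg0 := ((List.range n).map (fun _ => "0")).set (n - 1) "1"
  let st := text_list.foldl (stepA text_list) ([], 0)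
  let seg := st.1.foldl (fun s i => s.set (if i < 0 then i + (n : Int) else i).toNat "1") seg0
  PySem.Str.join "" seg

-- ===== PORT B =====

-- B's comprehension body: '1' if i == 0 or w != words[i-1] else '0' (short-circuit 'or';
-- for i >= 1 the index i-1 is always in range, so the getD default is never read)
def bitB (words : List String) (iw : Int × String) : String :=
  if iw.1 = 0 then "1"
  else if iw.2 ≠ PySem.List.pyGetD words (iw.1 - 1) "" then "1" else "0"

def find_segmentation_alt (bounds : List String) (text : String) : String :=
  let words := PySem.Str.split₀ (pyRemovePunct text)
  let bits := (PySem.List.enumerate words 0).map (bitB words)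
  PySem.Str.join "" (bits.set (bits.length - 1) "1")

-- ===== PRECONDITION & SPEC =====
-- Pre_ excludes exactly the texts containing no word once punctuation is removed: there A's
-- segmentation[-1] (and B's bits[-1]) raises IndexError, so neither program returns.
def Pre_find_segmentation (bounds : List String) (text : String) : Prop :=
  PySem.Str.split₀ (pyRemovePunct text) ≠ []
instance (bounds : List String) (text : String) : Decidable (Pre_find_segmentation bounds text) := by
  unfold Pre_find_segmentation; infer_instance

def pvWitness_find_segmentation : List String × String := (["x"], "one two, two three.")

def Spec_find_segmentation (bounds : List String) (text : String) (out : String) : Prop := out = find_segmentation_alt bounds text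
instance (bounds : List String) (text : String) (out : String) : Decidable (Spec_find_segmentation bounds text out) := by unfold Spec_find_segmentation; infer_instance

-- ===== CLAIM (what is proved, stated in full; the proofs are below) =====
def Claim_equal_find_segmentation : Prop := ∀ (bounds : List String) (text : String), Dom_find_segmentation bounds text → Pre_find_segmentation bounds text → Spec_find_segmentation bounds text (find_segmentation bounds text)

-- ===== LEMMAS AND PROOFS =====

lemma pvGoSound (q : Char → Prop) :
    ∀ (s cur : List Char) (acc : List (List Char)),
    (∀ c ∈ s, PySem.Chars.isspace c = false → q c) →
    (∀ c ∈ cur, q c ∧ PySem.Chars.isspace c = false) →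
    (∀ w ∈ acc, w ≠ [] ∧ ∀ c ∈ w, q c ∧ PySem.Chars.isspace c = false) →
    ∀ w ∈ PySem.Chars.split₀.go s cur acc, w ≠ [] ∧ ∀ c ∈ w, q c ∧ PySem.Chars.isspace c = false := by
  intro s
  induction s with
  | nil =>
    intro cur acc hs hcur hacc w hw
    rw [PySem.Chars.split₀.go] at hw
    split at hw
    · exact hacc w (List.mem_reverse.mp hw)
    · rcases List.mem_cons.mp (List.mem_reverse.mp hw) with h | h
      · subst h
        rename_i hne
        refine ⟨?_, ?_⟩
        · intro h; exact hne (by simp [List.isEmpty_iff, ← List.reverse_eq_nil_iff, h])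
        · intro c hc; exact hcur c (List.mem_reverse.mp hc)
      · exact hacc w h
  | cons c rest ih =>
    intro cur acc hs hcur hacc w hw
    rw [PySem.Chars.split₀.go] at hw
    by_cases hsp : PySem.Chars.isspace c = true
    · rw [if_pos hsp] at hw
      split at hw
      · exact ih [] acc (fun c hc h => hs c (List.mem_cons_of_mem _ hc) h) (by simp) hacc w hw
      · refine ih [] (cur.reverse :: acc) (fun c hc h => hs c (List.mem_cons_of_mem _ hc) h) (by simp) ?_ w hw
        intro w' hw'
        rcases List.mem_cons.mp hw' with h | h
        · subst h
          rename_i hne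
          refine ⟨?_, ?_⟩
          · intro h; exact hne (by simp [List.isEmpty_iff, ← List.reverse_eq_nil_iff, h])
          · intro c hc; exact hcur c (List.mem_reverse.mp hc)
        · exact hacc w' h
    · rw [if_neg hsp] at hw
      have hspf : PySem.Chars.isspace c = false := by simpa using hsp
      refine ih (c :: cur) acc (fun c hc h => hs c (List.mem_cons_of_mem _ hc) h) ?_ hacc w hw
      intro c' hc'
      rcases List.mem_cons.mp hc' with rfl | h
      · exact ⟨hs _ (by simp) hspf, hspf⟩
      · exact hcur c' h

lemma pvGoNonspace :
    ∀ (s cur : List Char) (acc : List (List Char)),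
    (∀ c ∈ s, PySem.Chars.isspace c = false) →
    PySem.Chars.split₀.go s cur acc = PySem.Chars.split₀.go [] (s.reverse ++ cur) acc := by
  intro s
  induction s with
  | nil => intro cur acc _; simp
  | cons c rest ih =>
    intro cur acc hs
    conv_lhs => rw [PySem.Chars.split₀.go]
    rw [if_neg (by simp [hs c (by simp)])]
    rw [ih (c :: cur) acc (fun c hc => hs c (List.mem_cons_of_mem _ hc))]
    simp

lemma pvSplitWord (w : List Char) (hne : w ≠ []) (hns : ∀ c ∈ w, PySem.Chars.isspace c = false) :
    PySem.Chars.split₀ w = [w] := by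
  show PySem.Chars.split₀.go w [] [] = [w]
  rw [pvGoNonspace w [] [] hns]
  rw [PySem.Chars.split₀.go]
  rw [if_neg (by simp [List.isEmpty_iff, hne])]
  simp

lemma pvSpanSound (text span : String) (h : span ∈ PySem.Str.split₀ (pyRemovePunct text)) :
    span.toList ≠ [] ∧ ∀ c ∈ span.toList, pyIsPunct c = false ∧ PySem.Chars.isspace c = false := by
  rcases List.mem_map.mp h with ⟨w, hw, rfl⟩
  have htl : (pyRemovePunct text).toList = text.toList.filter (fun c => !pyIsPunct c) := by
    simp [pyRemovePunct]
  rw [htl] at hw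
  have hs := pvGoSound (fun c => pyIsPunct c = false)
    (text.toList.filter (fun c => !pyIsPunct c)) [] []
    (fun c hc _ => by simpa using (List.mem_filter.mp hc).2) (by simp) (by simp) w hw
  refine ⟨by simpa using hs.1, ?_⟩
  intro c hc
  exact hs.2 c (by simpa using hc)

lemma pvSpanSplit (span : String) (h1 : span.toList ≠ [])
    (h2 : ∀ c ∈ span.toList, pyIsPunct c = false ∧ PySem.Chars.isspace c = false) :
    PySem.Str.split₀ (pyRemovePunct span) = [span] := by
  have hfix : pyRemovePunct span = span := by
    have : span.toList.filter (fun c => !pyIsPunct c) = span.toList :=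
      List.filter_eq_self.mpr (fun c hc => by simp [(h2 c hc).1])
    simp [pyRemovePunct, this]
  rw [hfix]
  show (PySem.Chars.split₀ span.toList).map String.ofList = [span]
  rw [pvSplitWord span.toList h1 (fun c hc => (h2 c hc).2)]
  simp

lemma pvIndexFrom_self (ws : List String) (e : Nat) (he : e < ws.length) :
    pyIndexFrom ws ws[e] (e : Int) = some e := by
  simp only [pyIndexFrom]
  rw [if_neg (by omega)]
  simp only [Int.toNat_natCast]
  rw [List.drop_eq_getElem_cons he, PySem.List.index?_cons_self]
  simp

lemma pvIndexFrom_far (ws : List String) (e k : Nat) (he : e ≤ k) (hk : k < ws.length)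
    (hgap : ∀ j, e ≤ j → j < k → ∀ (hj : j < ws.length), ws[j] ≠ ws[k]) :
    pyIndexFrom ws ws[k] (e : Int) = some k := by
  simp only [pyIndexFrom]
  rw [if_neg (by omega)]
  simp only [Int.toNat_natCast]
  have hidx : PySem.List.index? (ws.drop e) ws[k] = some (k - e) := by
    rw [PySem.List.index?_eq_some_iff]
    refine ⟨(ws.drop e).take (k - e), ws.drop (k + 1), ?_, ?_, ?_⟩
    · have h0 : (ws.drop e).drop (k - e) = ws[k] :: ws.drop (k + 1) := by
        rw [List.drop_drop]
        have hke : e + (k - e) = k := by omega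
        rw [hke, List.drop_eq_getElem_cons hk]
      calc ws.drop e = (ws.drop e).take (k - e) ++ (ws.drop e).drop (k - e) :=
            (List.take_append_drop _ _).symm
        _ = (ws.drop e).take (k - e) ++ (ws[k] :: ws.drop (k + 1)) := by rw [h0]
    · rw [List.length_take, List.length_drop]; omega
    · intro hmem
      rw [List.mem_iff_getElem] at hmem
      obtain ⟨m, hm, hms⟩ := hmem
      rw [List.length_take, List.length_drop] at hm
      have hm' : m < k - e := by omega
      have h1 : ((ws.drop e).take (k - e))[m] = ws[e + m] := by
        rw [List.getElem_take, List.getElem_drop]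
      exact hgap (e + m) (by omega) (by omega) (by omega) (by rw [← h1, hms])
  rw [hidx]
  simp only [Option.map_some]
  congr 1
  omega

lemma pvSetFoldLen (n : Nat) (ends : List Int) :
    ∀ (base : List String),
    (ends.foldl (fun s i => s.set (if i < 0 then i + (n : Int) else i).toNat "1") base).length
      = base.length := by
  induction ends with
  | nil => intro base; rfl
  | cons i rest ih => intro base; rw [List.foldl_cons, ih]; simp

lemma pvSetFoldGet (n : Nat) (ends : List Int) :
    ∀ (base : List String), base.length = n →
    (∀ x ∈ ends, 0 ≤ x ∧ x < (n : Int)) → ∀ j : Nat, j < n →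
    (ends.foldl (fun s i => s.set (if i < 0 then i + (n : Int) else i).toNat "1") base)[j]?
      = if (j : Int) ∈ ends then some "1" else base[j]? := by
  induction ends with
  | nil => intro base _ _ j _; simp
  | cons i rest ih =>
    intro base hlen hmem j hj
    rw [List.foldl_cons]
    have hi := hmem i (by simp)
    rw [if_neg (by omega)]
    rw [ih (base.set i.toNat "1") (by simpa using hlen)
        (fun x hx => hmem x (List.mem_cons_of_mem _ hx)) j hj]
    by_cases hjr : (j : Int) ∈ rest
    · simp [hjr]
    · by_cases hji : (j : Int) = i
      · have : i.toNat = j := by omega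
        simp [hjr, hji, List.getElem?_set, this, hlen, hj]
      · have : i.toNat ≠ j := by omega
        simp [hjr, hji, List.getElem?_set, this]

lemma pvBaseGet (n j : Nat) (hj : j < n) :
    (((List.range n).map (fun _ => "0")).set (n - 1) "1")[j]?
      = if j = n - 1 then some "1" else some "0" := by
  rw [List.getElem?_set]
  by_cases h : j = n - 1 <;> simp [h, hj, List.getElem?_map, List.getElem?_range]
  · omega
  · intro h2; omega

-- one step of A on the word ws[k], from state end = e, in the two possible cases
lemma pvStepA_eq (ws : List String) (k e : Nat) (hk : k < ws.length) (he : e < ws.length)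
    (hek : e ≤ k)
    (hsplit : PySem.Str.split₀ (pyRemovePunct ws[k]) = [ws[k]])
    (hgap : ∀ j, e < j → j < k → ws[j]? = ws[e]?)
    (ends : List Int) :
    stepA ws (ends, (e : Int)) ws[k]
      = if ws[e] = ws[k] then (ends ++ [(e : Int)], (e : Int))
        else (ends ++ [(k : Int)], (k : Int)) := by
  rw [stepA]
  simp only [hsplit, stepAEnd]
  have hget : PySem.List.pyGet? [ws[k]] (-1) = some ws[k] := by
    simp [PySem.List.pyGet?, PySem.List.pyIdx?]
  rw [hget]
  by_cases heq : ws[e] = ws[k]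
  · have hidx : pyIndexFrom ws ws[k] ((e : Nat) : Int) = some e := by
      rw [← heq]; exact pvIndexFrom_self ws e he
    simp only [hidx, heq, if_pos]
    rw [if_pos (by exact_mod_cast he)]
  · have hidx : pyIndexFrom ws ws[k] ((e : Nat) : Int) = some k := by
      refine pvIndexFrom_far ws e k hek hk ?_
      intro j hje hjk hj
      rcases Nat.eq_or_lt_of_le hje with rfl | hlt
      · exact heq
      · have hg := hgap j hlt hjk
        rw [List.getElem?_eq_getElem hj, List.getElem?_eq_getElem he] at hg
        rw [Option.some_inj.mp hg]; exact heq
    simp only [hidx]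
    rw [if_neg heq, if_pos (by exact_mod_cast hk)]

-- invariant run of A's fold: its ends list is characterised by 'first word of a run'
lemma pvMainA (ws : List String)
    (hsplit : ∀ span ∈ ws, PySem.Str.split₀ (pyRemovePunct span) = [span]) :
    ∀ (suf : List String) (k e : Nat) (ends : List Int),
    ws.drop k = suf → 1 ≤ k → e < k → k ≤ ws.length →
    (∀ x ∈ ends, 0 ≤ x ∧ x < (k : Int)) →
    ((e : Int) ∈ ends) →
    (∀ j, e < j → j < k → ws[j]? = ws[e]?) →
    ((0 : Int) ∈ ends) →
    (∀ j : Nat, 1 ≤ j → j < k → (((j : Int) ∈ ends) ↔ ws[j]? ≠ ws[j-1]?)) →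
    ((∀ x ∈ (suf.foldl (stepA ws) (ends, (e : Int))).1, 0 ≤ x ∧ x < (ws.length : Int))
      ∧ ((0 : Int) ∈ (suf.foldl (stepA ws) (ends, (e : Int))).1)
      ∧ ∀ j : Nat, 1 ≤ j → j < ws.length →
          (((j : Int) ∈ (suf.foldl (stepA ws) (ends, (e : Int))).1) ↔ ws[j]? ≠ ws[j-1]?)) := by
  intro suf
  induction suf with
  | nil =>
    intro k e ends hdrop hk1 hek hkle hbnd hmem hgap h0 hchar
    have hkeq : k = ws.length := by
      have := List.drop_eq_nil_iff.mp hdrop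
      omega
    subst hkeq
    simp only [List.foldl_nil]
    exact ⟨fun x hx => hbnd x hx, h0, fun j h1 h2 => hchar j h1 h2⟩
  | cons span rest ih =>
    intro k e ends hdrop hk1 hek hkle hbnd hmem hgap h0 hchar
    have hklt : k < ws.length := by
      have h1 : (ws.drop k).length = ws.length - k := List.length_drop ..
      rw [hdrop] at h1
      simp at h1
      omega
    have helt : e < ws.length := by omega
    have hcons := List.drop_eq_getElem_cons hklt
    rw [hdrop] at hcons
    obtain ⟨hwk', hdrop''⟩ := (List.cons.injEq _ _ _ _).mp hcons
    have hwk : ws[k] = span := hwk'.symm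
    have hdrop' : ws.drop (k + 1) = rest := hdrop''.symm
    have hstepA := pvStepA_eq ws k e hklt helt (by omega)
      (hsplit ws[k] (List.getElem_mem hklt)) (fun j h1 h2 => hgap j h1 h2) ends
    rw [hwk] at hstepA
    -- relate ws[e] with ws[k-1] through the gap invariant
    have hk1lt : k - 1 < ws.length := by omega
    have hprev : ws[k-1]'hk1lt = ws[e] := by
      rcases Nat.eq_or_lt_of_le (show e ≤ k - 1 by omega) with heq1 | hlt1
      · subst heq1; rfl
      · have hg := hgap (k-1) hlt1 (by omega)
        rw [List.getElem?_eq_getElem hk1lt, List.getElem?_eq_getElem helt] at hg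
        exact Option.some_inj.mp hg
    rw [List.foldl_cons, hstepA]
    by_cases heq : ws[e] = span
    · simp only [if_pos heq]
      refine ih (k + 1) e (ends ++ [(e : Int)]) hdrop' (by omega) (by omega) (by omega)
        ?_ (by simp) ?_ (by simp [h0]) ?_
      · intro x hx
        rcases List.mem_append.mp hx with h | h
        · exact ⟨(hbnd x h).1, by have := (hbnd x h).2; push_cast; omega⟩
        · simp at h; subst h; exact ⟨by positivity, by push_cast; omega⟩
      · intro j hj1 hj2
        rcases Nat.lt_or_ge j k with hjk | hjk
        · exact hgap j hj1 hjk
        · have : j = k := by omega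
          subst this
          rw [List.getElem?_eq_getElem hklt, List.getElem?_eq_getElem helt, hwk, heq]
      · intro j hj1 hj2
        rcases Nat.lt_or_ge j k with hjk | hjk
        · rw [← hchar j hj1 hjk]
          constructor
          · intro h
            rcases List.mem_append.mp h with h | h
            · exact h
            · simp at h; subst h; exact hmem
          · intro h; exact List.mem_append_left _ h
        · have : j = k := by omega
          subst this
          constructor
          · intro h
            rcases List.mem_append.mp h with h | h
            · have := (hbnd _ h).2; omega
            · simp at h; omega
          · intro h
            exfalso; apply h
            rw [List.getElem?_eq_getElem hklt, List.getElem?_eq_getElem hk1lt, hwk, hprev, heq]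
    · simp only [if_neg heq]
      refine ih (k + 1) k (ends ++ [(k : Int)]) hdrop' (by omega) (by omega) (by omega)
        ?_ (by simp) (fun j h1 h2 => absurd h2 (by omega)) (by simp [h0]) ?_
      · intro x hx
        rcases List.mem_append.mp hx with h | h
        · exact ⟨(hbnd x h).1, by have := (hbnd x h).2; push_cast; omega⟩
        · simp at h; subst h; exact ⟨by positivity, by push_cast; omega⟩
      · intro j hj1 hj2
        rcases Nat.lt_or_ge j k with hjk | hjk
        · rw [← hchar j hj1 hjk]
          constructor
          · intro h
            rcases List.mem_append.mp h with h | h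
            · exact h
            · simp at h; omega
          · intro h; exact List.mem_append_left _ h
        · have : j = k := by omega
          subst this
          constructor
          · intro _
            rw [List.getElem?_eq_getElem hklt, List.getElem?_eq_getElem hk1lt, hwk, hprev]
            intro hc
            exact heq (Option.some_inj.mp hc).symm
          · intro _; exact List.mem_append_right _ (by simp)
    
-- B's bit at position j
lemma pvBitsGet (ws : List String) (j : Nat) (hj : j < ws.length) :
    ((PySem.List.enumerate ws 0).map (bitB ws))[j]?
      = some (if h0 : j = 0 then "1"
              else if ws[j] ≠ ws[j-1]'(by omega) then "1" else "0") := by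
  rw [List.getElem?_map, PySem.List.getElem?_enumerate, List.getElem?_eq_getElem hj]
  simp only [Option.map_some, Option.some_inj]
  rw [bitB]
  by_cases h0 : j = 0
  · subst h0; simp
  · rw [dif_neg h0, if_neg (by simp; omega)]
    have hcast : ((0 : Int) + (j : Int)) - 1 = (((j - 1 : Nat)) : Int) := by push_cast; omega
    rw [hcast, PySem.List.pyGetD_natCast, List.getD_eq_getElem _ _ (by omega)]

set_option maxHeartbeats 2000000 in
theorem pv_final (bounds : List String) (text : String)
    (hpre : PySem.Str.split₀ (pyRemovePunct text) ≠ []) :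
    find_segmentation bounds text = find_segmentation_alt bounds text := by
  simp only [find_segmentation, find_segmentation_alt]
  set ws := PySem.Str.split₀ (pyRemovePunct text) with hws
  have hsplitall : ∀ span ∈ ws, PySem.Str.split₀ (pyRemovePunct span) = [span] := by
    intro span h
    obtain ⟨h1, h2⟩ := pvSpanSound text span h
    exact pvSpanSplit span h1 h2
  obtain ⟨w0, rest, hcons⟩ : ∃ w0 rest, ws = w0 :: rest := by
    cases hw : ws with
    | nil => exact absurd hw hpre
    | cons a l => exact ⟨a, l, rfl⟩
  have hlen0 : 0 < ws.length := by rw [hcons]; simp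
  -- first iteration of A's loop
  have hA1 : stepA ws ([], 0) w0 = ([(0 : Int)], (0 : Int)) := by
    have h0 : ws[0]'hlen0 = w0 := by simp [hcons]
    have := pvStepA_eq ws 0 0 hlen0 hlen0 (Nat.le_refl 0)
      (hsplitall (ws[0]'hlen0) (List.getElem_mem hlen0)) (fun j h1 h2 => absurd h2 (by omega)) []
    rw [h0] at this
    simpa using this
  have hfoldA : ws.foldl (stepA ws) ([], 0) = rest.foldl (stepA ws) ([(0 : Int)], (0 : Int)) := by
    conv_lhs => rw [hcons]
    rw [List.foldl_cons, ← hcons, hA1]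
  have hdrop1 : ws.drop 1 = rest := by rw [hcons]; simp
  have hmain := pvMainA ws hsplitall rest 1 0 [(0 : Int)] hdrop1 (by omega) (by omega)
    (by omega) (by intro x hx; simp at hx; subst hx; exact ⟨le_refl _, by norm_num⟩)
    (by simp) (fun j h1 h2 => absurd h2 (by omega)) (by simp)
    (fun j h1 h2 => absurd (Nat.lt_of_lt_of_le h2 h1) (by omega))
  simp only [Nat.cast_zero] at hmain
  obtain ⟨hAbnd, hA0, hAchar⟩ := hmain
  rw [hfoldA]
  set rA := rest.foldl (stepA ws) ([(0 : Int)], (0 : Int)) with hrA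
  rw [if_neg (by omega)]
  congr 1
  have hBlen : ((PySem.List.enumerate ws 0).map (bitB ws)).length = ws.length := by
    rw [List.length_map, PySem.List.length_enumerate]
  apply List.ext_getElem?
  intro j
  rcases Nat.lt_or_ge j ws.length with hj | hj
  · have hL := pvSetFoldGet ws.length rA.1
      ((((List.range ws.length).map (fun _ => "0")).set (ws.length - 1) "1")) (by simp) hAbnd j hj
    rw [pvBaseGet ws.length j hj] at hL
    rw [hL]
    rw [List.getElem?_set, hBlen, pvBitsGet ws j hj]
    by_cases hje : j = ws.length - 1
    · rw [if_pos (show ws.length - 1 = j by omega), if_pos (show ws.length - 1 < ws.length by omega)]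
      by_cases hm : (j : Int) ∈ rA.1
      · rw [if_pos hm]
      · rw [if_neg hm, if_pos hje]
    · rw [if_neg (show ¬ ws.length - 1 = j by omega)]
      by_cases h0 : j = 0
      · subst h0; simp [hA0]
      · rw [dif_neg h0]
        have hc := hAchar j (by omega) hj
        rw [List.getElem?_eq_getElem hj, List.getElem?_eq_getElem (show j - 1 < ws.length by omega)] at hc
        simp only [ne_eq, Option.some_inj] at hc
        by_cases hne : ws[j] = ws[j-1]'(by omega)
        · rw [if_neg (by rw [hc]; simp [hne]), if_neg hje, if_neg (by simp [hne])]
        · rw [if_pos (hc.mpr hne), if_pos (by simp [hne])]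
  · rw [List.getElem?_eq_none (by rw [pvSetFoldLen]; simp; omega),
      List.getElem?_eq_none (by rw [List.length_set, hBlen]; omega)]

-- ===== VERDICT =====
theorem find_segmentation_spec : Claim_equal_find_segmentation := by
  intro bounds text _ hpre
  unfold Pre_find_segmentation at hpre
  unfold Spec_find_segmentation
  exact pv_final bounds text hpre
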